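-- pv_equiv track=rewrite | github.com/williamtbranch/weavelang | gutenberg_cleaner.py | remove_multiline_illustration_blocks
-- ===== SOURCE A (Python) =====
-- def remove_multiline_illustration_blocks(lines):
--     output_lines = []
--     in_illustration_block = False
--     block_start_chars = ["[illustration", "[Illustration:"] # Make it a list
--
--     for line in lines:
--         stripped_line = line.strip()
--         is_block_start = any(stripped_line.lower().startswith(start_char) for start_char in block_start_chars)
--
--         if in_illustration_block:
--             if stripped_line.endswith("]"):
--                 in_illustration_block = False
--             # Continue to skip lines within the block
--         elif is_block_start:
--             if not stripped_line.endswith("]"): # If it doesn't end on the same line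
--                 in_illustration_block = True
--             # Else (it's a single line [Illustration...]), it's skipped this line
--         else:
--             output_lines.append(line) # Not in a block and not starting one
--     return output_lines
-- ===== SOURCE B (Python) =====
-- def remove_multiline_illustration_blocks(lines):
--     out = []
--     i = 0
--     n = len(lines)
--     while i < n:
--         line = lines[i]
--         s = line.strip()
--         if s.lower().startswith("[illustration"):
--             if not s.endswith("]"):
--                 # inner loop: skip lines until (and including) the closing one
--                 i += 1
--                 while i < n and not lines[i].strip().endswith("]"):
--                     i += 1
--             i += 1
--         else:
--             out.append(line)
--             i += 1
--     return out
-- ===== Notes on version B (the rewrite author's own statement) =====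
-- stated objective: alternative
-- what changed: Replaces A's boolean in-block flag carried through a single pass by an index-driven outer while loop with an inner while loop that consumes a whole [Illustration ...] block (up to and including its closing ']' line) in one go; the dead second start-marker test of A is dropped since lower() can never produce a capital 'I'.
import Mathlib
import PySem

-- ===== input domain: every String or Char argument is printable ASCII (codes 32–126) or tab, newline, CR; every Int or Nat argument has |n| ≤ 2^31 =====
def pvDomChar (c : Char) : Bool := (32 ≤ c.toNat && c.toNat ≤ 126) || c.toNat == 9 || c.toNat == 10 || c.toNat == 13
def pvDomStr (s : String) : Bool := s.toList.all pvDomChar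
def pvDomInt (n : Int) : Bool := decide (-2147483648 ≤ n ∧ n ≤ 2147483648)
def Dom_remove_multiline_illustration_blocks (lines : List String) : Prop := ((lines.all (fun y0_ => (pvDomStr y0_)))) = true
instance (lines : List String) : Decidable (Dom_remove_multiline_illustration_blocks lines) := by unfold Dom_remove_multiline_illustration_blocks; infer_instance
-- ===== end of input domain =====

-- B replaces A's boolean-flag single pass by an index-driven loop with an inner
-- skip loop that consumes a whole [Illustration …] block at once (objective: alternative).

-- ===== PORT A =====
-- A's loop body, step for step: state = (output_lines, in_illustration_block)
def pvStepA (st : List String × Bool) (line : String) : List String × Bool :=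
  let stripped := PySem.Str.strip line
  let isBlockStart :=
    PySem.Str.startswith (PySem.Str.lower stripped) "[illustration" ||
    PySem.Str.startswith (PySem.Str.lower stripped) "[Illustration:"
  if st.2 then
    if PySem.Str.endswith stripped "]" then (st.1, false) else st
  else if isBlockStart then
    if !(PySem.Str.endswith stripped "]") then (st.1, true) else st
  else (st.1 ++ [line], st.2)

def remove_multiline_illustration_blocks (lines : List String) : List String :=
  (lines.foldl pvStepA ([], false)).1

-- ===== PORT B =====
-- B's inner while loop: skip lines until one whose stripped form ends with "]",
-- skipping that closing line too (runs off the end if no closer exists).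
def pvSkipClose : List String → List String
  | [] => []
  | l :: rest =>
    if PySem.Str.endswith (PySem.Str.strip l) "]" then rest else pvSkipClose rest

-- termination measure for the outer loop (cited by decreasing_by below)
theorem pvSkipClose_length_le (ls : List String) : (pvSkipClose ls).length ≤ ls.length := by
  induction ls with
  | nil => simp [pvSkipClose]
  | cons l rest ih =>
    simp only [pvSkipClose]
    split
    · simp
    · exact Nat.le_trans ih (Nat.le_succ _)

-- B's outer while loop over the remaining suffix of lines
def remove_multiline_illustration_blocks_alt : List String → List String
  | [] => []
  | line :: rest =>
    let s := PySem.Str.strip line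
    if PySem.Str.startswith (PySem.Str.lower s) "[illustration" then
      if PySem.Str.endswith s "]" then
        remove_multiline_illustration_blocks_alt rest
      else
        remove_multiline_illustration_blocks_alt (pvSkipClose rest)
    else
      line :: remove_multiline_illustration_blocks_alt rest
termination_by ls => ls.length
decreasing_by
  · simp
  · exact Nat.lt_succ_of_le (pvSkipClose_length_le rest)
  · simp

-- ===== PRECONDITION & SPEC =====
def Spec_remove_multiline_illustration_blocks (lines : List String) (out : List String) : Prop := out = remove_multiline_illustration_blocks_alt lines
instance (lines : List String) (out : List String) : Decidable (Spec_remove_multiline_illustration_blocks lines out) := by unfold Spec_remove_multiline_illustration_blocks; infer_instance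

-- ===== CLAIM (what is proved, stated in full; the proofs are below) =====
def Claim_equal_remove_multiline_illustration_blocks : Prop := ∀ (lines : List String), Dom_remove_multiline_illustration_blocks lines → Spec_remove_multiline_illustration_blocks lines (remove_multiline_illustration_blocks lines)

-- ===== LEMMAS AND PROOFS =====

theorem pvToNat_ofNat (n : Nat) (h : n.isValidChar) : (Char.ofNat n).toNat = n := by
  unfold Char.ofNat; rw [dif_pos h]; rfl

-- Python's str.lower never produces a capital 'I'
theorem pvLowerChar_ne_I (c : Char) : PySem.Chars.lowerChar c ≠ 'I' := by
  have e1 : 'A'.val.toNat = 65 := rfl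
  have e2 : 'Z'.val.toNat = 90 := rfl
  have e3 : 'I'.toNat = 73 := rfl
  simp only [PySem.Chars.lowerChar, PySem.Chars.isupper]
  split
  · next hc =>
    simp only [Bool.and_eq_true, decide_eq_true_eq, Char.le_def,
      UInt32.le_iff_toNat_le, e1, e2] at hc
    obtain ⟨h1, h2⟩ := hc
    intro h
    have h3 := congrArg Char.toNat h
    rw [pvToNat_ofNat _ (Or.inl (by unfold Char.toNat; omega))] at h3
    rw [e3] at h3
    unfold Char.toNat at h3
    omega
  · intro h; subst h; simp_all

-- hence A's second (dead) membership test is always false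
theorem pvSecond_false (cs : List Char) :
    PySem.Chars.startswith (PySem.Chars.lower cs)
      ['[', 'I', 'l', 'l', 'u', 's', 't', 'r', 'a', 't', 'i', 'o', 'n', ':'] = false := by
  rw [Bool.eq_false_iff]
  intro h
  obtain ⟨t, ht⟩ := (PySem.Chars.startswith_iff _ _).mp h
  have h1 : (PySem.Chars.lower cs)[1]? = some 'I' := by rw [← ht]; rfl
  simp only [PySem.Chars.lower, List.getElem?_map] at h1
  cases h2 : cs[1]? with
  | none => rw [h2] at h1; simp at h1
  | some c =>
    rw [h2] at h1
    simp at h1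
    exact pvLowerChar_ne_I c h1

-- in the flag=true state, A's fold consumes exactly what pvSkipClose drops
theorem pvT (ls : List String) : ∀ out : List String,
    (List.foldl pvStepA (out, true) ls).1 =
      (List.foldl pvStepA (out, false) (pvSkipClose ls)).1 := by
  induction ls with
  | nil => intro out; rfl
  | cons l rest ih =>
    intro out
    by_cases he : PySem.Chars.endswith (PySem.Chars.strip l.toList) [']'] = true
    · simp [List.foldl, pvStepA, pvSkipClose, he]
    · simp [List.foldl, pvStepA, pvSkipClose, he, ih out]

-- in the flag=false state, A's fold appends exactly what B produces
theorem pvF : ∀ (n : Nat) (ls : List String), ls.length ≤ n → ∀ out : List String,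
    (List.foldl pvStepA (out, false) ls).1 =
      out ++ remove_multiline_illustration_blocks_alt ls := by
  intro n
  induction n with
  | zero =>
    intro ls hls out
    have h0 : ls = [] := List.eq_nil_of_length_eq_zero (Nat.le_zero.mp hls)
    subst h0
    simp [remove_multiline_illustration_blocks_alt]
  | succ n ih =>
    intro ls hls out
    cases ls with
    | nil => simp [remove_multiline_illustration_blocks_alt]
    | cons line rest =>
      simp only [List.length_cons, Nat.succ_le_succ_iff] at hls
      rw [remove_multiline_illustration_blocks_alt]
      by_cases hs : PySem.Chars.startswith (PySem.Chars.lower (PySem.Chars.strip line.toList))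
          ['[', 'i', 'l', 'l', 'u', 's', 't', 'r', 'a', 't', 'i', 'o', 'n'] = true
      · by_cases he : PySem.Chars.endswith (PySem.Chars.strip line.toList) [']'] = true
        · simp [List.foldl, pvStepA, hs, he, pvSecond_false]
          exact ih rest hls out
        · simp [List.foldl, pvStepA, hs, he, pvSecond_false]
          rw [pvT rest out]
          exact ih (pvSkipClose rest) (Nat.le_trans (pvSkipClose_length_le rest) hls) out
      · simp [List.foldl, pvStepA, hs, pvSecond_false]
        rw [ih rest hls (out ++ [line])]
        simp

-- ===== VERDICT (by name: the statement is the Claim_ definition above) =====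
theorem remove_multiline_illustration_blocks_spec : Claim_equal_remove_multiline_illustration_blocks := by
  intro lines _
  unfold Spec_remove_multiline_illustration_blocks remove_multiline_illustration_blocks
  rw [pvF lines.length lines (Nat.le_refl _) []]
  rfl
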